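-- pv_equiv track=rewrite | github.com/Deanhz/normal_works | algorithm-books/程序员面试指南/python/递归和动态规划/斐波那契系列问题.py | cattle2
-- ===== SOURCE A (Python) =====
-- def cattle2(n): # O(N)
--     if n < 1:
--         return 0
--     if n == 1 or n == 2 or n == 3:
--         return n
--     res = 3
--     pre = 2
--     prepre = 1
--     for i in range(4,n+1):
--         tmp = res
--         res = res + prepre
--         prepre = pre
--         pre = tmp
--     return res
-- ===== SOURCE B (Python) =====
-- def cattle2(n):
--     if n < 1:
--         return 0
--     if n <= 3:
--         return n
--     def mul(A, B):
--         return tuple(tuple(sum(A[i][k] * B[k][j] for k in range(3)) for j in range(3)) for i in range(3))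
--     M = ((1, 0, 1), (1, 0, 0), (0, 1, 0))
--     R = ((1, 0, 0), (0, 1, 0), (0, 0, 1))
--     e = n - 3
--     while e:
--         if e & 1:
--             R = mul(R, M)
--         M = mul(M, M)
--         e >>= 1
--     return R[0][0] * 3 + R[0][1] * 2 + R[0][2] * 1
-- ===== Notes on version B (the rewrite author's own statement) =====
-- stated objective: alternative
-- what changed: Replaced the O(n) three-variable iteration by binary matrix exponentiation of the order-3 companion matrix applied to the seed vector (3,2,1).
import Mathlib
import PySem

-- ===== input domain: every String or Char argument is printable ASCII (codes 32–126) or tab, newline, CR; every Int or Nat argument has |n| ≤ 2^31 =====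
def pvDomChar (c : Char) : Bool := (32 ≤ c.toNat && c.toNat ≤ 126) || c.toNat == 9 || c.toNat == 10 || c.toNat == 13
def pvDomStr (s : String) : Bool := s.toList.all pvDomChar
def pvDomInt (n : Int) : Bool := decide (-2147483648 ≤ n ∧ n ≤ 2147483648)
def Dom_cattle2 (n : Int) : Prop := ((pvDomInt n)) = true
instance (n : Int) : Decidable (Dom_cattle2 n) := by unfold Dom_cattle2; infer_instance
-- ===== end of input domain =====

-- B replaces A's three-variable loop by binary exponentiation of the order-3
-- companion matrix applied to the seed vector (3,2,1): fewer iterations, same result.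

-- ===== PORT A =====
-- literal port of A: the for-loop over range(4, n+1) carrying (res, pre, prepre)
def cattle2 (n : Int) : Int :=
  if n < 1 then 0
  else if n = 1 ∨ n = 2 ∨ n = 3 then n
  else
    ((PySem.List.pyRange 4 (n + 1) 1).foldl
      (fun (st : Int × Int × Int) _ => (st.1 + st.2.2, st.1, st.2.1))
      (3, 2, 1)).1

-- ===== PORT B =====
-- 3×3 integer matrix (rows (a b c), (d e f), (g h i))
structure Mat3 where
  a : Int
  b : Int
  c : Int
  d : Int
  e : Int
  f : Int
  g : Int
  h : Int
  i : Int
deriving DecidableEq, Repr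

-- Source B's mul: entry (i,j) = Σₖ A[i][k]·B[k][j]
def matMul (A B : Mat3) : Mat3 :=
  ⟨A.a*B.a + A.b*B.d + A.c*B.g, A.a*B.b + A.b*B.e + A.c*B.h, A.a*B.c + A.b*B.f + A.c*B.i,
   A.d*B.a + A.e*B.d + A.f*B.g, A.d*B.b + A.e*B.e + A.f*B.h, A.d*B.c + A.e*B.f + A.f*B.i,
   A.g*B.a + A.h*B.d + A.i*B.g, A.g*B.b + A.h*B.e + A.i*B.h, A.g*B.c + A.h*B.f + A.i*B.i⟩

def matI : Mat3 := ⟨1,0,0, 0,1,0, 0,0,1⟩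
def matM : Mat3 := ⟨1,0,1, 1,0,0, 0,1,0⟩

-- Source B's while-loop: square-and-multiply over the binary digits of e
def matLoop (R M : Mat3) (e : Nat) : Mat3 :=
  if e = 0 then R
  else matLoop (if e % 2 = 1 then matMul R M else R) (matMul M M) (e / 2)
termination_by e
decreasing_by omega

def cattle2_alt (n : Int) : Int :=
  if n < 1 then 0
  else if n ≤ 3 then n
  else
    let R := matLoop matI matM (n - 3).toNat
    R.a * 3 + R.b * 2 + R.c * 1

-- ===== PRECONDITION & SPEC =====
def Spec_cattle2 (n : Int) (out : Int) : Prop := out = cattle2_alt n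
instance (n : Int) (out : Int) : Decidable (Spec_cattle2 n out) := by unfold Spec_cattle2; infer_instance

-- ===== CLAIM (what is proved, stated in full; the proofs are below) =====
def Claim_equal_cattle2 : Prop := ∀ (n : Int), Dom_cattle2 n → Spec_cattle2 n (cattle2 n)

-- ===== LEMMAS AND PROOFS =====

-- naive matrix power, the proof-side reference
def npow (M : Mat3) : Nat → Mat3
  | 0 => matI
  | k + 1 => matMul M (npow M k)

theorem matMul_assoc (A B C : Mat3) : matMul (matMul A B) C = matMul A (matMul B C) := by
  cases A; cases B; cases C
  simp only [matMul, Mat3.mk.injEq]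
  and_intros <;> ring

theorem matMul_I (R : Mat3) : matMul R matI = R := by
  cases R; simp [matMul, matI]

theorem I_matMul (R : Mat3) : matMul matI R = R := by
  cases R; simp [matMul, matI]

theorem npow_two_mul (M : Mat3) (k : Nat) : npow (matMul M M) k = npow M (2 * k) := by
  induction k with
  | zero => rfl
  | succ k ih =>
    have : 2 * (k + 1) = (2 * k + 1) + 1 := by omega
    rw [this, npow, npow, npow, ih, ← matMul_assoc]

theorem matLoop_eq (e : Nat) : ∀ R M : Mat3, matLoop R M e = matMul R (npow M e) := by
  induction e using Nat.strong_induction_on with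
  | _ e ih =>
    intro R M
    rw [matLoop]
    by_cases h0 : e = 0
    · simp [h0, npow, matMul_I]
    · simp only [h0, if_false]
      rw [ih (e / 2) (by omega), npow_two_mul]
      by_cases hodd : e % 2 = 1
      · have he : e = 2 * (e / 2) + 1 := by omega
        simp only [hodd, if_true]
        rw [matMul_assoc]
        conv_rhs => rw [he]
        rw [npow]
      · have he : e = 2 * (e / 2) := by omega
        simp only [hodd, if_false]
        conv_rhs => rw [he]

-- vector action of a matrix on a column (x, y, z)
def appv (P : Mat3) (v : Int × Int × Int) : Int × Int × Int :=
  (P.a * v.1 + P.b * v.2.1 + P.c * v.2.2,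
   P.d * v.1 + P.e * v.2.1 + P.f * v.2.2,
   P.g * v.1 + P.h * v.2.1 + P.i * v.2.2)

def stepf (st : Int × Int × Int) : Int × Int × Int := (st.1 + st.2.2, st.1, st.2.1)

theorem appv_mul (P Q : Mat3) (v : Int × Int × Int) :
    appv (matMul P Q) v = appv P (appv Q v) := by
  cases P; cases Q
  simp only [appv, matMul, Prod.mk.injEq]
  and_intros <;> ring

theorem stepf_eq_appv (v : Int × Int × Int) : stepf v = appv matM v := by
  simp only [stepf, appv, matM]
  obtain ⟨x, y, z⟩ := v
  simp only [Prod.mk.injEq]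
  and_intros <;> ring

theorem iterate_stepf (k : Nat) (v : Int × Int × Int) :
    stepf^[k] v = appv (npow matM k) v := by
  induction k with
  | zero =>
    obtain ⟨x, y, z⟩ := v
    simp [npow, matI, appv]
  | succ k ih =>
    rw [Function.iterate_succ_apply', ih, stepf_eq_appv, ← appv_mul, npow]

theorem foldl_const_iterate {α : Type} (xs : List α) (v : Int × Int × Int) :
    xs.foldl (fun st _ => stepf st) v = stepf^[xs.length] v := by
  induction xs generalizing v with
  | nil => rfl
  | cons x xs ih => simp [List.foldl_cons, ih, Function.iterate_succ_apply]

-- ===== VERDICT (by name: the statement is the Claim_ definition above) =====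
theorem cattle2_spec : Claim_equal_cattle2 := by
  intro n _
  unfold Spec_cattle2 cattle2 cattle2_alt
  by_cases h1 : n < 1
  · simp [h1]
  · simp only [h1, if_false]
    by_cases h3 : n = 1 ∨ n = 2 ∨ n = 3
    · have hle : n ≤ 3 := by rcases h3 with h | h | h <;> omega
      simp [h3, hle]
    · have hgt : ¬ n ≤ 3 := by omega
      simp only [h3, hgt, if_false]
      have hfold :
          (PySem.List.pyRange 4 (n + 1) 1).foldl
            (fun (st : Int × Int × Int) _ => (st.1 + st.2.2, st.1, st.2.1)) (3, 2, 1)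
          = stepf^[(n - 3).toNat] (3, 2, 1) := by
        have hlen : (PySem.List.pyRange 4 (n + 1) 1).length = (n - 3).toNat := by
          rw [PySem.List.length_pyRange_one]; omega
        have := foldl_const_iterate (PySem.List.pyRange 4 (n + 1) 1) (3, 2, 1)
        simpa [stepf, hlen] using this
      rw [hfold, iterate_stepf, matLoop_eq, I_matMul]
      simp only [appv]
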